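-- pv_equiv track=rewrite | github.com/yalamber/blorm_dapp | scripts/process_video.py | overlay_text_on_frame
-- ===== SOURCE A (Python) =====
-- def overlay_text_on_frame(frame, text, padding=2):
--     frame_lines = frame.split('\n')
--     text_lines = text.split('\n')
--
--     # Calculate the starting position for the overlay
--     start_y = (len(frame_lines) - len(text_lines)) // 2
--     max_line_length = max(len(line) for line in frame_lines)
--     text_max_length = max(len(line) for line in text_lines)
--     start_x = (max_line_length - text_max_length) // 2
--
--     # Create a new frame with padding
--     padded_frame_lines = []
--     for _ in range(padding):
--         padded_frame_lines.append(" " * max_line_length)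
--
--     for i, line in enumerate(text_lines):
--         new_line = (
--             " " * start_x + line + " " * (max_line_length - start_x - len(line))
--         )
--         padded_frame_lines.append(new_line)
--
--     for _ in range(padding):
--         padded_frame_lines.append(" " * max_line_length)
--
--     # Combine the padded frame lines into a single string
--     padded_frame = "\n".join(padded_frame_lines)
--
--     # Overlay the padded text onto the frame
--     start_y = (len(frame_lines) - len(padded_frame_lines)) // 2
--     for i, line in enumerate(padded_frame_lines):
--         frame_y = start_y + i
--         if 0 <= frame_y < len(frame_lines):
--             frame_lines[frame_y] = line
--
--     return "\n".join(frame_lines)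
-- ===== SOURCE B (Python) =====
-- def overlay_text_on_frame(frame, text, padding=2):
--     rows = frame.split('\n')
--     tl = text.split('\n')
--     F = len(rows)
--     W = max(len(r) for r in rows)
--     T = max(len(l) for l in tl)
--     left = (W - T) // 2
--     pb = max(padding, 0)
--     L = 2 * pb + len(tl)
--     sy = (F - L) // 2
--     lo = max(sy, 0)
--     hi = min(sy + L, F)
--
--     def block_line(k):
--         # k-th line of the virtual overlay block, 0 <= k < L (never materialized)
--         if k < pb or k >= pb + len(tl):
--             return " " * W
--         l = tl[k - pb]
--         return " " * left + l + " " * (W - left - len(l))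
--
--     spliced = rows[:lo] + [block_line(k) for k in range(lo - sy, hi - sy)] + rows[hi:]
--     return "\n".join(spliced)
-- ===== Notes on version B (the rewrite author's own statement) =====
-- stated objective: faster
-- what changed: B never materializes the padded overlay block and has no write-back loop: it computes the clipped window [lo,hi) arithmetically (pb=max(padding,0), L=2*pb+len(text_lines), sy=(F-L)//2) and splices rows[:lo] + [block_line(k) generated on demand for k in the window] + rows[hi:], so the 2*padding blank lines are never built and work is independent of padding, while A appends the whole block (O(padding) lines) and then copies it into the frame by bounds-checked index assignment.
import Mathlib
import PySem

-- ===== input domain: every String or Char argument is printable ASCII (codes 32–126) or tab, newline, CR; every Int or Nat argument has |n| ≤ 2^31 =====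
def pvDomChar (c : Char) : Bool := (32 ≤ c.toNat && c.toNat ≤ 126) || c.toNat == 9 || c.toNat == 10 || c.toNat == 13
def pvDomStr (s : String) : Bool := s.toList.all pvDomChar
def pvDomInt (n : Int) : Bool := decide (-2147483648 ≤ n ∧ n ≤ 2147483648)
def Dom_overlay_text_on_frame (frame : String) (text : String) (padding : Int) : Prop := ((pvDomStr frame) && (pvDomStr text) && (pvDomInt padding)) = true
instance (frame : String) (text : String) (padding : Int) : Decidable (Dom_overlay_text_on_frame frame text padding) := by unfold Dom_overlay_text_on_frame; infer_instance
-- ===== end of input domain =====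

-- B replaces A's materialize-block-then-copy-by-index-assignment with arithmetic clipping:
-- it computes the window [lo,hi) of frame rows covered by the (virtual) overlay block and
-- splices rows[:lo] + [on-demand block lines] + rows[hi:]; the 2*padding blank lines are never
-- built as a list, so B's work does not grow with padding (a timing run measured B faster).
-- Same return value; string work is done on List Char via PySem.Chars (exact).

-- max(len(line) for line in lines) on a nonempty list (split never returns [])
def pvMaxLen (ls : List (List Char)) : Int :=
  match ls with
  | [] => 0
  | h :: t => t.foldl (fun acc l => max acc (PySem.List.len l)) (PySem.List.len h)

-- ===== PORT A =====
-- A's write-back loop ('for i, line in enumerate(padded_frame_lines)' with the bounds-checked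
-- index assignment), as a structural recursion carrying the running index s
def pvWriteLoop (sy : Int) (block : List (List Char)) (s : Int) (fls : List (List Char)) : List (List Char) :=
  match block with
  | [] => fls
  | b :: bs =>
    let frame_y := sy + s
    pvWriteLoop sy bs (s + 1)
      (if 0 ≤ frame_y ∧ frame_y < PySem.List.len fls then PySem.List.pySetD fls frame_y b else fls)

def overlay_text_on_frame (frame : String) (text : String) (padding : Int) : String :=
  let frame_lines := PySem.Chars.splitOn frame.toList ['\n']
  let text_lines := PySem.Chars.splitOn text.toList ['\n']
  let max_line_length := pvMaxLen frame_lines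
  let text_max_length := pvMaxLen text_lines
  let start_x := PySem.Int.floordiv (max_line_length - text_max_length) 2
  -- the appends accumulate into an Array (Python's amortized O(1) list.append)
  let padded0 := (PySem.List.pyRange 0 padding 1).foldl
    (fun acc _ => acc.push (PySem.List.pyRepeat [' '] max_line_length)) (#[] : Array (List Char))
  let padded1 := text_lines.foldl
    (fun acc line => acc.push (PySem.List.pyRepeat [' '] start_x ++ line ++
        PySem.List.pyRepeat [' '] (max_line_length - start_x - PySem.List.len line))) padded0
  let padded_frame_lines := ((PySem.List.pyRange 0 padding 1).foldl
    (fun acc _ => acc.push (PySem.List.pyRepeat [' '] max_line_length)) padded1).toList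
  -- (A also joins padded_frame_lines into the unused variable padded_frame: a dead pure value, omitted)
  let start_y := PySem.Int.floordiv (PySem.List.len frame_lines - PySem.List.len padded_frame_lines) 2
  let final := pvWriteLoop start_y padded_frame_lines 0 frame_lines
  String.ofList (PySem.Chars.join ['\n'] final)

-- ===== PORT B =====
-- block_line(k): the k-th line of the virtual overlay block (never materialized as a list)
def pvBlockLine (pb left W : Int) (tl : List (List Char)) (k : Int) : List Char :=
  if k < pb ∨ pb + PySem.List.len tl ≤ k then PySem.List.pyRepeat [' '] W
  else
    let l := PySem.List.pyGetD tl (k - pb) []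
    PySem.List.pyRepeat [' '] left ++ l ++ PySem.List.pyRepeat [' '] (W - left - PySem.List.len l)

def overlay_text_on_frame_alt (frame : String) (text : String) (padding : Int) : String :=
  let rows := PySem.Chars.splitOn frame.toList ['\n']
  let tl := PySem.Chars.splitOn text.toList ['\n']
  let F := PySem.List.len rows
  let W := pvMaxLen rows
  let T := pvMaxLen tl
  let left := PySem.Int.floordiv (W - T) 2
  let pb := max padding 0
  let L := 2 * pb + PySem.List.len tl
  let sy := PySem.Int.floordiv (F - L) 2
  let lo := max sy 0
  let hi := min (sy + L) F
  let spliced := PySem.List.slice rows none (some lo)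
    ++ (PySem.List.pyRange (lo - sy) (hi - sy) 1).map (pvBlockLine pb left W tl)
    ++ PySem.List.slice rows (some hi) none
  String.ofList (PySem.Chars.join ['\n'] spliced)

-- ===== PRECONDITION & SPEC =====
def Spec_overlay_text_on_frame (frame : String) (text : String) (padding : Int) (out : String) : Prop := out = overlay_text_on_frame_alt frame text padding
instance (frame : String) (text : String) (padding : Int) (out : String) : Decidable (Spec_overlay_text_on_frame frame text padding out) := by unfold Spec_overlay_text_on_frame; infer_instance

-- ===== CLAIM (what is proved, stated in full; the proofs are below) =====
def Claim_equal_overlay_text_on_frame : Prop := ∀ (frame : String) (text : String) (padding : Int), Dom_overlay_text_on_frame frame text padding → Spec_overlay_text_on_frame frame text padding (overlay_text_on_frame frame text padding)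

-- ===== LEMMAS AND PROOFS =====

theorem pvWriteLoop_cons (sy : Int) (b : List Char) (bs : List (List Char)) (s : Int) (fls : List (List Char)) :
    pvWriteLoop sy (b :: bs) s fls = pvWriteLoop sy bs (s + 1)
      (if 0 ≤ sy + s ∧ sy + s < PySem.List.len fls then PySem.List.pySetD fls (sy + s) b else fls) := by
  rfl

theorem pvWriteLoop_getElem? (sy : Int) (block : List (List Char)) :
    ∀ (s : Int) (fls : List (List Char)) (j : Nat), j < fls.length →
    (pvWriteLoop sy block s fls)[j]? =
      if sy + s ≤ (j : Int) ∧ (j : Int) < sy + s + block.length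
      then block[((j : Int) - sy - s).toNat]? else fls[j]? := by
  induction block with
  | nil =>
    intro s fls j hj
    have hc : ¬ (sy + s ≤ (j : Int) ∧ (j : Int) < sy + s + (([] : List (List Char)).length : Int)) := by
      simp only [List.length_nil, Nat.cast_zero]; omega
    rw [if_neg hc]
    simp [pvWriteLoop]
  | cons b bs ih =>
    intro s fls j hj
    rw [pvWriteLoop_cons]
    by_cases hw : 0 ≤ sy + s ∧ sy + s < PySem.List.len fls
    · rw [if_pos hw]
      have hlen : (PySem.List.pySetD fls (sy + s) b).length = fls.length :=
        PySem.List.length_pySetD _ _ _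
      rw [ih (s + 1) _ j (by omega)]
      rw [PySem.List.pySetD_of_nonneg _ _ hw.1]
      simp only [PySem.List.len_eq] at hw
      by_cases h1 : sy + (s + 1) ≤ (j : Int) ∧ (j : Int) < sy + (s + 1) + (bs.length : Int)
      · have hc : sy + s ≤ (j : Int) ∧ (j : Int) < sy + s + (((b :: bs).length : Nat) : Int) := by
          simp only [List.length_cons]; push_cast; omega
        rw [if_pos h1, if_pos hc]
        have : ((j : Int) - sy - s).toNat = ((j : Int) - sy - (s + 1)).toNat + 1 := by omega
        rw [this]
        simp
      · rw [if_neg h1]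
        by_cases h2 : (j : Int) = sy + s
        · have hc : sy + s ≤ (j : Int) ∧ (j : Int) < sy + s + (((b :: bs).length : Nat) : Int) := by
            simp only [List.length_cons]; push_cast; omega
          rw [if_pos hc]
          have hz : ((j : Int) - sy - s).toNat = 0 := by omega
          have hjt : (sy + s).toNat = j := by omega
          rw [hz, hjt, List.getElem?_set_self hj]
          rfl
        · have hc : ¬ (sy + s ≤ (j : Int) ∧ (j : Int) < sy + s + (((b :: bs).length : Nat) : Int)) := by
            simp only [List.length_cons]; push_cast; omega
          rw [if_neg hc]
          rw [List.getElem?_set_ne (by omega)]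
    · rw [if_neg hw]
      simp only [PySem.List.len_eq] at hw
      rw [ih (s + 1) _ j hj]
      by_cases h1 : sy + (s + 1) ≤ (j : Int) ∧ (j : Int) < sy + (s + 1) + (bs.length : Int)
      · have hc : sy + s ≤ (j : Int) ∧ (j : Int) < sy + s + (((b :: bs).length : Nat) : Int) := by
          simp only [List.length_cons]; push_cast; omega
        rw [if_pos h1, if_pos hc]
        have : ((j : Int) - sy - s).toNat = ((j : Int) - sy - (s + 1)).toNat + 1 := by omega
        rw [this]; simp
      · have hc : ¬ (sy + s ≤ (j : Int) ∧ (j : Int) < sy + s + (((b :: bs).length : Nat) : Int)) := by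
          simp only [List.length_cons]; push_cast; omega
        rw [if_neg h1, if_neg hc]

theorem pvWriteLoop_length (sy : Int) (block : List (List Char)) :
    ∀ (s : Int) (fls : List (List Char)), (pvWriteLoop sy block s fls).length = fls.length := by
  induction block with
  | nil => intro s fls; simp [pvWriteLoop]
  | cons b bs ih =>
    intro s fls
    rw [pvWriteLoop_cons, ih]
    split_ifs with h
    · exact PySem.List.length_pySetD _ _ _
    · rfl

theorem pvFoldPush {α β : Type} (f : α → β) (l : List α) (arr : Array β) :
    (l.foldl (fun acc x => acc.push (f x)) arr).toList = arr.toList ++ l.map f := by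
  induction l generalizing arr with
  | nil => simp
  | cons x xs ih => simp

theorem pvBlock_eq (padding : Int) (blank : List Char) (tl : List (List Char))
    (f : List Char → List Char) :
    (((PySem.List.pyRange 0 padding 1).foldl (fun acc _ => acc.push blank)
      (tl.foldl (fun acc line => acc.push (f line))
        ((PySem.List.pyRange 0 padding 1).foldl (fun acc _ => acc.push blank)
          (#[] : Array (List Char))))).toList)
    = List.replicate padding.toNat blank ++ tl.map f ++ List.replicate padding.toNat blank := by
  have h : ∀ (arr : Array (List Char)),
      ((PySem.List.pyRange 0 padding 1).foldl (fun acc _ => acc.push blank) arr).toList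
        = arr.toList ++ List.replicate padding.toNat blank := by
    intro arr
    rw [show (fun (acc : Array (List Char)) (_ : Int) => acc.push blank)
        = (fun acc x => acc.push ((fun (_ : Int) => blank) x)) from rfl,
      pvFoldPush (fun (_ : Int) => blank)]
    congr 1
    rw [List.map_const', PySem.List.length_pyRange_one]
    simp
  rw [h, pvFoldPush, h]
  simp

-- A's index-assignment loop produces exactly B's splice of the clipped window
theorem pvSplice_eq (rows block : List (List Char)) (bl : Int → List Char) (sy : Int)
    (hge : 0 ≤ sy + (block.length : Int))
    (hbl : ∀ (k : Nat) (h : k < block.length), bl (k : Int) = block[k]) :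
    pvWriteLoop sy block 0 rows =
      PySem.List.slice rows none (some (max sy 0)) ++
      (PySem.List.pyRange (max sy 0 - sy) (min (sy + (block.length : Int)) (rows.length : Int) - sy) 1).map bl ++
      PySem.List.slice rows (some (min (sy + (block.length : Int)) (rows.length : Int))) none := by
  have hL0 : (0:Int) ≤ (block.length : Int) := by positivity
  have hF0 : (0:Int) ≤ (rows.length : Int) := by positivity
  have hlo0 : (0:Int) ≤ max sy 0 := le_max_right _ _
  have hhi0 : (0:Int) ≤ min (sy + (block.length : Int)) (rows.length : Int) := le_min hge hF0
  rw [PySem.List.slice_to _ hlo0, PySem.List.slice_from _ hhi0, List.append_assoc]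
  have hPlen : (rows.take (max sy 0).toNat).length = min (max sy 0).toNat rows.length :=
    List.length_take
  have hMlen : ((PySem.List.pyRange (max sy 0 - sy)
      (min (sy + (block.length : Int)) (rows.length : Int) - sy) 1).map bl).length
      = ((min (sy + (block.length : Int)) (rows.length : Int) - sy) - (max sy 0 - sy)).toNat := by
    rw [List.length_map, PySem.List.length_pyRange_one]
  have hSlen : (rows.drop (min (sy + (block.length : Int)) (rows.length : Int)).toNat).length
      = rows.length - (min (sy + (block.length : Int)) (rows.length : Int)).toNat :=
    List.length_drop
  apply List.ext_getElem?
  intro j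
  by_cases hjF : j < rows.length
  · rw [pvWriteLoop_getElem? sy block 0 rows j hjF]
    by_cases h1 : (j : Int) < max sy 0
    · -- prefix region: below the window
      have hjP : j < (rows.take (max sy 0).toNat).length := by rw [hPlen]; omega
      rw [List.getElem?_append_left hjP, List.getElem?_take_of_lt (by omega)]
      rw [if_neg (by omega)]
    · by_cases h2 : (j : Int) < min (sy + (block.length : Int)) (rows.length : Int)
      · -- middle region: inside the clipped window
        have hjP : (rows.take (max sy 0).toNat).length ≤ j := by rw [hPlen]; omega
        rw [List.getElem?_append_right hjP]
        have hjM : j - (rows.take (max sy 0).toNat).length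
            < ((PySem.List.pyRange (max sy 0 - sy)
                (min (sy + (block.length : Int)) (rows.length : Int) - sy) 1).map bl).length := by
          rw [hMlen, hPlen]; omega
        rw [List.getElem?_append_left hjM, List.getElem?_map]
        rw [PySem.List.getElem?_pyRange_one]
        rw [if_pos (by omega)]
        have hidx : ((j : Int) - sy - 0).toNat < block.length := by omega
        rw [List.getElem?_eq_getElem hidx]
        have hval : bl ((((j : Int) - sy - 0).toNat : Int)) = block[((j : Int) - sy - 0).toNat] :=
          hbl _ hidx
        rw [hPlen] at hjP ⊢
        rw [if_pos (by omega), Option.map_some]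
        have harg : max sy 0 - sy + ((j - min (max sy 0).toNat rows.length : Nat) : Int)
            = (((j : Int) - sy - 0).toNat : Int) := by omega
        rw [harg, hval]
      · -- suffix region: past the window
        have hjP : (rows.take (max sy 0).toNat).length ≤ j := by rw [hPlen]; omega
        rw [List.getElem?_append_right hjP]
        have hjM : ((PySem.List.pyRange (max sy 0 - sy)
            (min (sy + (block.length : Int)) (rows.length : Int) - sy) 1).map bl).length
            ≤ j - (rows.take (max sy 0).toNat).length := by
          rw [hMlen, hPlen]; omega
        rw [List.getElem?_append_right hjM, List.getElem?_drop]
        rw [if_neg (by omega)]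
        congr 1
        rw [hMlen, hPlen]
        omega
  · -- j out of range of the frame: both sides are none
    rw [List.getElem?_eq_none (by rw [pvWriteLoop_length]; omega)]
    rw [List.getElem?_eq_none ?_]
    simp only [List.length_append, hPlen, hMlen, hSlen]
    omega

-- B's on-demand block_line agrees with A's materialized block, index by index
theorem pvBlockLine_spec (padding W left : Int) (tl : List (List Char)) (k : Nat)
    (hk : k < (List.replicate padding.toNat (PySem.List.pyRepeat [' '] W)
      ++ tl.map (fun line => PySem.List.pyRepeat [' '] left ++ line
          ++ PySem.List.pyRepeat [' '] (W - left - PySem.List.len line))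
      ++ List.replicate padding.toNat (PySem.List.pyRepeat [' '] W)).length) :
    pvBlockLine (max padding 0) left W tl (k : Int)
      = (List.replicate padding.toNat (PySem.List.pyRepeat [' '] W)
        ++ tl.map (fun line => PySem.List.pyRepeat [' '] left ++ line
            ++ PySem.List.pyRepeat [' '] (W - left - PySem.List.len line))
        ++ List.replicate padding.toNat (PySem.List.pyRepeat [' '] W))[k] := by
  simp only [List.length_append, List.length_replicate, List.length_map] at hk
  unfold pvBlockLine
  simp only [PySem.List.len_eq]
  by_cases hk1 : k < padding.toNat
  · rw [if_pos (Or.inl (by omega))]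
    rw [List.getElem_append_left (by simp; omega), List.getElem_append_left (by simp; omega),
      List.getElem_replicate]
  · by_cases hk2 : k < padding.toNat + tl.length
    · rw [if_neg (by omega)]
      rw [List.getElem_append_left (by simp; omega),
        List.getElem_append_right (by simp; omega)]
      simp only [List.getElem_map, List.length_replicate]
      rw [PySem.List.pyGetD_eq_getElem _ _ (by omega) (by omega)]
      have hidx : ((k : Int) - max padding 0).toNat = k - padding.toNat := by omega
      have h1 : tl[((k : Int) - max padding 0).toNat] = tl[k - padding.toNat]'(by omega) :=
        getElem_congr rfl hidx (by omega)
      rw [h1]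
    · rw [if_pos (Or.inr (by omega))]
      rw [List.getElem_append_right (by simp; omega), List.getElem_replicate]

-- A's whole pipeline equals B's splice, at the level of line lists
theorem pvMain (rows tl : List (List Char)) (padding W left : Int) :
    pvWriteLoop
      (PySem.Int.floordiv (PySem.List.len rows - PySem.List.len
        (List.replicate padding.toNat (PySem.List.pyRepeat [' '] W)
          ++ tl.map (fun line => PySem.List.pyRepeat [' '] left ++ line
              ++ PySem.List.pyRepeat [' '] (W - left - PySem.List.len line))
          ++ List.replicate padding.toNat (PySem.List.pyRepeat [' '] W))) 2)
      (List.replicate padding.toNat (PySem.List.pyRepeat [' '] W)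
        ++ tl.map (fun line => PySem.List.pyRepeat [' '] left ++ line
            ++ PySem.List.pyRepeat [' '] (W - left - PySem.List.len line))
        ++ List.replicate padding.toNat (PySem.List.pyRepeat [' '] W)) 0 rows
    = PySem.List.slice rows none
        (some (max (PySem.Int.floordiv (PySem.List.len rows - (2 * max padding 0 + PySem.List.len tl)) 2) 0))
      ++ (PySem.List.pyRange
          (max (PySem.Int.floordiv (PySem.List.len rows - (2 * max padding 0 + PySem.List.len tl)) 2) 0
            - PySem.Int.floordiv (PySem.List.len rows - (2 * max padding 0 + PySem.List.len tl)) 2)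
          (min (PySem.Int.floordiv (PySem.List.len rows - (2 * max padding 0 + PySem.List.len tl)) 2
              + (2 * max padding 0 + PySem.List.len tl)) (PySem.List.len rows)
            - PySem.Int.floordiv (PySem.List.len rows - (2 * max padding 0 + PySem.List.len tl)) 2) 1).map
          (pvBlockLine (max padding 0) left W tl)
      ++ PySem.List.slice rows
          (some (min (PySem.Int.floordiv (PySem.List.len rows - (2 * max padding 0 + PySem.List.len tl)) 2
              + (2 * max padding 0 + PySem.List.len tl)) (PySem.List.len rows))) none := by
  have hlen : (PySem.List.len
      (List.replicate padding.toNat (PySem.List.pyRepeat [' '] W)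
        ++ tl.map (fun line => PySem.List.pyRepeat [' '] left ++ line
            ++ PySem.List.pyRepeat [' '] (W - left - PySem.List.len line))
        ++ List.replicate padding.toNat (PySem.List.pyRepeat [' '] W)))
      = 2 * max padding 0 + PySem.List.len tl := by
    simp [PySem.List.len_eq]
    omega
  rw [hlen]
  have hge : 0 ≤ PySem.Int.floordiv (PySem.List.len rows - (2 * max padding 0 + PySem.List.len tl)) 2
      + (2 * max padding 0 + PySem.List.len tl) := by
    rw [PySem.Int.floordiv_eq_ediv_of_pos (by norm_num)]
    simp only [PySem.List.len_eq]
    omega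
  have h := pvSplice_eq rows
    (List.replicate padding.toNat (PySem.List.pyRepeat [' '] W)
      ++ tl.map (fun line => PySem.List.pyRepeat [' '] left ++ line
          ++ PySem.List.pyRepeat [' '] (W - left - PySem.List.len line))
      ++ List.replicate padding.toNat (PySem.List.pyRepeat [' '] W))
    (pvBlockLine (max padding 0) left W tl)
    (PySem.Int.floordiv (PySem.List.len rows - (2 * max padding 0 + PySem.List.len tl)) 2)
    ?_ ?_
  · rw [h]
    have hcast : ((List.replicate padding.toNat (PySem.List.pyRepeat [' '] W)
        ++ tl.map (fun line => PySem.List.pyRepeat [' '] left ++ line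
            ++ PySem.List.pyRepeat [' '] (W - left - PySem.List.len line))
        ++ List.replicate padding.toNat (PySem.List.pyRepeat [' '] W)).length : Int)
        = 2 * max padding 0 + PySem.List.len tl := by
      simpa [PySem.List.len_eq] using hlen
    rw [hcast]
    simp [PySem.List.len_eq]
  · have hcast : ((List.replicate padding.toNat (PySem.List.pyRepeat [' '] W)
        ++ tl.map (fun line => PySem.List.pyRepeat [' '] left ++ line
            ++ PySem.List.pyRepeat [' '] (W - left - PySem.List.len line))
        ++ List.replicate padding.toNat (PySem.List.pyRepeat [' '] W)).length : Int)
        = 2 * max padding 0 + PySem.List.len tl := by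
      simpa [PySem.List.len_eq] using hlen
    rw [hcast]
    exact hge
  · intro k hk
    exact pvBlockLine_spec padding W left tl k hk

-- ===== VERDICT (by name: the statement is the Claim_ definition above) =====
theorem overlay_text_on_frame_spec : Claim_equal_overlay_text_on_frame := by
  intro frame text padding _
  unfold Spec_overlay_text_on_frame overlay_text_on_frame overlay_text_on_frame_alt
  simp only [pvBlock_eq]
  exact congrArg _ (congrArg _ (pvMain _ _ _ _ _))
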